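-- pv_equiv track=rewrite | github.com/pypi-data/pypi-mirror-400 | packages/fluxem/fluxem-1.0.1.tar.gz/fluxem-1.0.1/fluxem/domains/music/__init__.py | invariant_under_Tn
-- ===== SOURCE A (Python) =====
-- from typing import Any, Dict, List, Optional, Tuple, Union
--
-- def invariant_under_Tn(pcs: List[int]) -> List[int]:
--     """
--     Find all transposition invariants (Tn where Tn(S) = S).
--
--     """
--     invariants = []
--
--     sorted_pcs = sorted(set(pc % 12 for pc in pcs))
--
--     for n in range(12):
--         transposed = sorted([(pc + n) % 12 for pc in sorted_pcs])
--         if transposed == sorted_pcs: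
--             invariants.append(n)
--
--     return invariants
-- ===== SOURCE B (Python) =====
-- def invariant_under_Tn(pcs):
--     """
--     Find all transposition invariants (Tn where Tn(S) = S).
--
--     The invariant transpositions form a subgroup of Z/12, hence are exactly
--     the multiples of the minimal period d of the set, which is a divisor of
--     12: find the smallest divisor d of 12 under which the set is periodic
--     and return the multiples of d.
--     """
--     s = {pc % 12 for pc in pcs}
--     for d in (1, 2, 3, 4, 6, 12):
--         if all((pc + d) % 12 in s for pc in s):
--             return list(range(0, 12, d))
-- ===== Notes on version B (the rewrite author's own statement) =====
-- stated objective: alternative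
-- what changed: Instead of testing all 12 transpositions by transpose-sort-compare, B uses that the invariant transpositions form a subgroup of Z/12: it finds the smallest divisor d of 12 under which the pitch-class set is periodic and returns range(0, 12, d) without examining the other transpositions.
import Mathlib
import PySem

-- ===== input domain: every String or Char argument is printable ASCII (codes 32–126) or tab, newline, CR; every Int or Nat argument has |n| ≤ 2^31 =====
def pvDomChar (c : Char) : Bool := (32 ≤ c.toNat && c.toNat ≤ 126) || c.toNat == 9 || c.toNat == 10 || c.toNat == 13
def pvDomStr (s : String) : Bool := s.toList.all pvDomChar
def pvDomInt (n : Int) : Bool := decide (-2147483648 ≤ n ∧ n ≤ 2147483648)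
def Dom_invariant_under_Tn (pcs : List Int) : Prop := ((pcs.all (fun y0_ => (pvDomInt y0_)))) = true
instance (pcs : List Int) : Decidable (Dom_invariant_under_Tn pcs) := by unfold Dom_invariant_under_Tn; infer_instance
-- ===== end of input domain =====

-- B replaces A's scan of all 12 transpositions by group theory: the invariant
-- transpositions form a subgroup of Z/12, so B finds the minimal period d (a
-- divisor of 12) and returns the multiples of d (alternative algorithm).

-- ===== PORT A =====
def invariant_under_Tn (pcs : List Int) : List Int :=
  let sorted_pcs := PySem.List.sorted (PySem.Set.ofList (pcs.map (fun pc => PySem.Int.mod pc 12))) (fun x => x) false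
  (PySem.List.pyRange 0 12 1).foldl (fun invariants n =>
    let transposed := PySem.List.sorted (sorted_pcs.map (fun pc => PySem.Int.mod (pc + n) 12)) (fun x => x) false
    if transposed = sorted_pcs then invariants ++ [n] else invariants) []

-- ===== PORT B =====
-- the 'for d in (1,2,3,4,6,12)' loop with early return; [] is the (unreachable
-- in the Python, since d = 12 always satisfies the test) exhausted case
def pvLoop (s : List Int) : List Int → List Int
  | [] => []
  | d :: rest =>
      if s.all (fun pc => decide ((PySem.Int.mod (pc + d) 12) ∈ s)) then
        PySem.List.pyRange 0 12 d
      else pvLoop s rest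

def invariant_under_Tn_alt (pcs : List Int) : List Int :=
  let s := PySem.Set.ofList (pcs.map (fun pc => PySem.Int.mod pc 12))
  pvLoop s [1, 2, 3, 4, 6, 12]

-- ===== PRECONDITION & SPEC =====
def Spec_invariant_under_Tn (pcs : List Int) (out : List Int) : Prop := out = invariant_under_Tn_alt pcs
instance (pcs : List Int) (out : List Int) : Decidable (Spec_invariant_under_Tn pcs out) := by unfold Spec_invariant_under_Tn; infer_instance

-- ===== CLAIM (what is proved, stated in full; the proofs are below) =====
def Claim_equal_invariant_under_Tn : Prop := ∀ (pcs : List Int), Dom_invariant_under_Tn pcs → Spec_invariant_under_Tn pcs (invariant_under_Tn pcs)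

-- ===== LEMMAS AND PROOFS =====

-- the canonical sorted nodup residue list computed by A
def pvS (pcs : List Int) : List Int :=
  PySem.List.sorted (PySem.Set.ofList (pcs.map (fun pc => PySem.Int.mod pc 12))) (fun x => x) false

-- the 12-bit characteristic mask of the residue set (proof tool only)
def pvMask (pcs : List Int) : Nat :=
  pcs.foldl (fun m pc => m ||| (1 <<< (PySem.Int.mod pc 12).toNat)) 0

-- 'the mask is invariant under cyclic rotation by n'
def pvRot (m n : Nat) : Bool := ((((m <<< n) ||| (m >>> (12 - n))) &&& 4095) == m)

-- A's result as a function of the mask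
def pvMaskInv (m : Nat) : List Int :=
  (PySem.List.pyRange 0 12 1).filter (fun n => pvRot m n.toNat)

-- B's result as a function of the mask
def pvMaskB (m : Nat) : List Int :=
  if pvRot m 1 then PySem.List.pyRange 0 12 1
  else if pvRot m 2 then PySem.List.pyRange 0 12 2
  else if pvRot m 3 then PySem.List.pyRange 0 12 3
  else if pvRot m 4 then PySem.List.pyRange 0 12 4
  else if pvRot m 6 then PySem.List.pyRange 0 12 6
  else PySem.List.pyRange 0 12 12

theorem pvS_pairwise (pcs : List Int) : (pvS pcs).Pairwise (· < ·) :=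
  PySem.List.sorted_ofList_pairwise_lt _

theorem pvS_mem (pcs : List Int) (x : Int) :
    x ∈ pvS pcs ↔ ∃ pc ∈ pcs, PySem.Int.mod pc 12 = x := by
  unfold pvS
  rw [PySem.List.mem_sorted, PySem.Set.mem_ofList, List.mem_map]

theorem pvS_bounds (pcs : List Int) (x : Int) (hx : x ∈ pvS pcs) : 0 ≤ x ∧ x < 12 := by
  obtain ⟨pc, _, rfl⟩ := (pvS_mem pcs x).mp hx
  exact ⟨PySem.Int.mod_nonneg pc (by norm_num), PySem.Int.mod_lt pc (by norm_num)⟩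

theorem pvMask_testBit (pcs : List Int) (acc : Nat) (i : Nat) :
    (pcs.foldl (fun m pc => m ||| (1 <<< (PySem.Int.mod pc 12).toNat)) acc).testBit i
      = (acc.testBit i || (decide (i < 12) && pcs.any (fun pc => PySem.Int.mod pc 12 == (i : Int)))) := by
  simp only [PySem.Int.mod_eq_emod_of_pos (show (0:Int) < 12 by norm_num)]
  induction pcs generalizing acc with
  | nil => simp
  | cons pc rest ih =>
    rw [List.foldl_cons, ih, List.any_cons]
    have h0 : (0:Int) ≤ pc % 12 := Int.emod_nonneg pc (by norm_num)
    have h12 : pc % 12 < 12 := Int.emod_lt_of_pos pc (by norm_num)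
    rw [Nat.testBit_or, show (1 <<< (pc % 12).toNat) = 2 ^ (pc % 12).toNat by
      rw [Nat.shiftLeft_eq, one_mul], Nat.testBit_two_pow]
    rcases Decidable.em ((pc % 12).toNat = i) with heq | hne
    · have hc : (pc % 12 == (i:Int)) = true := by rw [beq_iff_eq]; omega
      have hi : i < 12 := by omega
      simp [heq, hc, hi]
    · have hc : (pc % 12 == (i:Int)) = false := by
        rw [beq_eq_false_iff_ne]; intro h; omega
      simp [hne, hc]

theorem pvMask_bit_iff_mem (pcs : List Int) (i : Nat) (hi : i < 12) :
    (pvMask pcs).testBit i = true ↔ ((i : Int) ∈ pvS pcs) := by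
  unfold pvMask
  rw [pvMask_testBit, pvS_mem]
  simp [hi, List.any_eq_true]

theorem pvMask_high (pcs : List Int) (i : Nat) (hi : 12 ≤ i) :
    (pvMask pcs).testBit i = false := by
  unfold pvMask
  rw [pvMask_testBit]
  simp [Nat.not_lt.mpr hi] at *

theorem pvMask_lt_aux (l : List Int) (acc : Nat) (h : acc < 2 ^ 12) :
    l.foldl (fun m pc => m ||| (1 <<< (PySem.Int.mod pc 12).toNat)) acc < 2 ^ 12 := by
  induction l generalizing acc with
  | nil => exact h
  | cons pc rest ih =>
    apply ih
    apply Nat.or_lt_two_pow h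
    rw [Nat.shiftLeft_eq, one_mul]
    apply Nat.pow_lt_pow_right (by norm_num)
    have h1 := PySem.Int.mod_lt pc (show (0:Int) < 12 by norm_num)
    have h2 := PySem.Int.mod_nonneg pc (show (0:Int) < 12 by norm_num)
    omega

theorem pvMask_lt (pcs : List Int) : pvMask pcs < 4096 := by
  have h := pvMask_lt_aux pcs 0 (by norm_num)
  unfold pvMask
  omega

theorem pv4095_testBit (i : Nat) : (4095 : Nat).testBit i = decide (i < 12) := by
  rw [show (4095:Nat) = 2^12 - 1 by norm_num, Nat.testBit_two_pow_sub_one]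

theorem pvRot_testBit (m n i : Nat) (hh : ∀ j, 12 ≤ j → m.testBit j = false) (hn : n < 12) (hi : i < 12) :
    (((m <<< n) ||| (m >>> (12 - n))) &&& 4095).testBit i = m.testBit ((i + 12 - n) % 12) := by
  rw [Nat.testBit_and, pv4095_testBit, Nat.testBit_or, Nat.testBit_shiftLeft, Nat.testBit_shiftRight]
  by_cases hcase : n ≤ i
  · have h1 : (i + 12 - n) % 12 = i - n := by omega
    have h2 : m.testBit ((12 - n) + i) = false := hh _ (by omega)
    simp [hcase, hi, h1, h2]
  · have h1 : (i + 12 - n) % 12 = (12 - n) + i := by omega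
    simp [hcase, hi, h1]

theorem pvCondB_iff (m n : Nat) (hh : ∀ j, 12 ≤ j → m.testBit j = false) (hn : n < 12) :
    pvRot m n = true
      ↔ (∀ i, i < 12 → m.testBit ((i + 12 - n) % 12) = m.testBit i) := by
  unfold pvRot
  rw [beq_iff_eq]
  constructor
  · intro he i hi
    rw [← pvRot_testBit m n i hh hn hi, he]
  · intro hb
    apply Nat.eq_of_testBit_eq
    intro i
    by_cases hi : i < 12
    · rw [pvRot_testBit m n i hh hn hi, hb i hi]
    · rw [hh i (by omega), Nat.testBit_and, pv4095_testBit]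
      simp [hi]

-- the forward-shift inclusion (B's test) already forces shift-equality:
-- the shift is injective on the finite residue set, so its image has the same
-- cardinality and the inclusion is an equality
theorem pvPeriod (pcs : List Int) (d : Int) (hd : 0 < d) (h12 : d < 12)
    (C : ∀ x ∈ pvS pcs, PySem.Int.mod (x + d) 12 ∈ pvS pcs) :
    ∀ i : Nat, i < 12 → ((i : Int) ∈ pvS pcs →
      (((i + 12 - d.toNat) % 12 : Nat) : Int) ∈ pvS pcs) := by
  have hσ : ∀ x : Int, PySem.Int.mod (x + d) 12 = (x + d) % 12 := by
    intro x; rw [PySem.Int.mod_eq_emod_of_pos (by norm_num)]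
  have hsub : ((pvS pcs).toFinset.image (fun x => PySem.Int.mod (x + d) 12)) ⊆ (pvS pcs).toFinset := by
    intro y hy
    obtain ⟨x, hx, rfl⟩ := Finset.mem_image.mp hy
    exact List.mem_toFinset.mpr (C x (List.mem_toFinset.mp hx))
  have hinj : Set.InjOn (fun x => PySem.Int.mod (x + d) 12) (pvS pcs).toFinset := by
    intro a ha b hb he
    have hba := pvS_bounds pcs a (List.mem_toFinset.mp ha)
    have hbb := pvS_bounds pcs b (List.mem_toFinset.mp hb)
    simp only [hσ] at he
    omega
  have heq : ((pvS pcs).toFinset.image (fun x => PySem.Int.mod (x + d) 12)) = (pvS pcs).toFinset :=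
    Finset.eq_of_subset_of_card_le hsub
      (le_of_eq (Finset.card_image_of_injOn hinj).symm)
  intro i hi hiS
  have hmem : (i : Int) ∈ (pvS pcs).toFinset.image (fun x => PySem.Int.mod (x + d) 12) := by
    rw [heq]; exact List.mem_toFinset.mpr hiS
  obtain ⟨x, hxF, hx⟩ := Finset.mem_image.mp hmem
  have hxS := List.mem_toFinset.mp hxF
  have hb := pvS_bounds pcs x hxS
  rw [hσ] at hx
  have hcast : (((i + 12 - d.toNat) % 12 : Nat) : Int) = ((i + 12 - d.toNat : Nat) : Int) % 12 := by
    push_cast; rfl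
  have : (((i + 12 - d.toNat) % 12 : Nat) : Int) = x := by omega
  rwa [this]

-- B's membership test at period d is exactly the mask-rotation condition
theorem pvCondC (pcs : List Int) (d : Int) (hd : 0 < d) (h12 : d < 12) :
    ((PySem.Set.ofList (pcs.map (fun pc => PySem.Int.mod pc 12))).all
        (fun pc => decide ((PySem.Int.mod (pc + d) 12) ∈
          PySem.Set.ofList (pcs.map (fun pc => PySem.Int.mod pc 12)))))
      = pvRot (pvMask pcs) d.toNat := by
  have hmem : ∀ x : Int, (x ∈ PySem.Set.ofList (pcs.map (fun pc => PySem.Int.mod pc 12))) ↔ x ∈ pvS pcs := by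
    intro x
    rw [pvS_mem, PySem.Set.mem_ofList, List.mem_map]
  rw [Bool.eq_iff_iff, List.all_eq_true]
  simp only [decide_eq_true_iff, hmem]
  rw [pvCondB_iff (pvMask pcs) d.toNat (pvMask_high pcs) (by omega)]
  constructor
  · intro C i hi
    rw [Bool.eq_iff_iff, pvMask_bit_iff_mem pcs _ (by omega), pvMask_bit_iff_mem pcs i hi]
    constructor
    · intro hsh
      have := C _ hsh
      have hb := pvS_bounds pcs _ hsh
      have hcast : (((i + 12 - d.toNat) % 12 : Nat) : Int) = ((i + 12 - d.toNat : Nat) : Int) % 12 := by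
        push_cast; rfl
      have harg : PySem.Int.mod ((((i + 12 - d.toNat) % 12 : Nat) : Int) + d) 12 = (i : Int) := by
        rw [PySem.Int.mod_eq_emod_of_pos (by norm_num)]
        omega
      rwa [harg] at this
    · exact pvPeriod pcs d hd h12 C i hi
  · intro hbits x hx
    have hb := pvS_bounds pcs x hx
    have hi : ((x + d) % 12).toNat < 12 := by omega
    have := hbits ((x + d) % 12).toNat hi
    rw [Bool.eq_iff_iff, pvMask_bit_iff_mem pcs _ (by omega), pvMask_bit_iff_mem pcs _ hi] at this
    have hcast : (((((x + d) % 12).toNat + 12 - d.toNat) % 12 : Nat) : Int)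
        = ((((x + d) % 12).toNat + 12 - d.toNat : Nat) : Int) % 12 := by
      push_cast; rfl
    have hx' : (((((x + d) % 12).toNat + 12 - d.toNat) % 12 : Nat) : Int) = x := by omega
    have hres : PySem.Int.mod (x + d) 12 = ((((x + d) % 12).toNat : Nat) : Int) := by
      rw [PySem.Int.mod_eq_emod_of_pos (by norm_num)]
      omega
    rw [hres]
    exact this.mp (by rw [hx']; exact hx)

-- at d = 12 B's test is trivially true (the shift is the identity on residues)
theorem pvCond12 (pcs : List Int) :
    ((PySem.Set.ofList (pcs.map (fun pc => PySem.Int.mod pc 12))).all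
        (fun pc => decide ((PySem.Int.mod (pc + 12) 12) ∈
          PySem.Set.ofList (pcs.map (fun pc => PySem.Int.mod pc 12))))) = true := by
  have hmem : ∀ x : Int, (x ∈ PySem.Set.ofList (pcs.map (fun pc => PySem.Int.mod pc 12))) ↔ x ∈ pvS pcs := by
    intro x
    rw [pvS_mem, PySem.Set.mem_ofList, List.mem_map]
  rw [List.all_eq_true]
  intro x hx
  rw [decide_eq_true_iff, hmem]
  have hxS := (hmem x).mp hx
  have hb := pvS_bounds pcs x hxS
  have : PySem.Int.mod (x + 12) 12 = x := by
    rw [PySem.Int.mod_eq_emod_of_pos (by norm_num)]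
    omega
  rwa [this]

-- A's condition at n equals the mask-rotation condition (A side)
theorem pvMapBounds (pcs : List Int) (n : Nat) (x : Int)
    (hx : x ∈ (pvS pcs).map (fun pc => PySem.Int.mod (pc + (n : Int)) 12)) : 0 ≤ x ∧ x < 12 := by
  obtain ⟨pc, _, rfl⟩ := List.mem_map.mp hx
  exact ⟨PySem.Int.mod_nonneg _ (by norm_num), PySem.Int.mod_lt _ (by norm_num)⟩

theorem pvMemMap (pcs : List Int) (n i : Nat) (hn : n < 12) (hi : i < 12) :
    ((i : Int) ∈ (pvS pcs).map (fun pc => PySem.Int.mod (pc + (n : Int)) 12))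
      ↔ ((((i + 12 - n) % 12 : Nat) : Int) ∈ pvS pcs) := by
  rw [List.mem_map]
  constructor
  · rintro ⟨pc, hpc, heq⟩
    have hb := pvS_bounds pcs pc hpc
    rw [PySem.Int.mod_eq_emod_of_pos (by norm_num)] at heq
    have : ((((i + 12 - n) % 12 : Nat)) : Int) = pc := by
      have hcast : ((((i + 12 - n) % 12 : Nat)) : Int) = ((i + 12 - n : Nat) : Int) % 12 := by
        push_cast
        rfl
      omega
    rwa [this]
  · intro hj
    refine ⟨_, hj, ?_⟩
    rw [PySem.Int.mod_eq_emod_of_pos (by norm_num)]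
    have hcast : ((((i + 12 - n) % 12 : Nat)) : Int) = ((i + 12 - n : Nat) : Int) % 12 := by
      push_cast
      rfl
    omega

theorem pvMapNodup (pcs : List Int) (n : Nat) :
    ((pvS pcs).map (fun pc => PySem.Int.mod (pc + (n : Int)) 12)).Nodup := by
  apply List.Nodup.map_on _ ((pvS_pairwise pcs).imp (fun h => ne_of_lt h))
  intro a ha b hb he
  have hba := pvS_bounds pcs a ha
  have hbb := pvS_bounds pcs b hb
  rw [PySem.Int.mod_eq_emod_of_pos (by norm_num), PySem.Int.mod_eq_emod_of_pos (by norm_num)] at he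
  omega

theorem pvCondA_iff (pcs : List Int) (n : Nat) (hn : n < 12) :
    (PySem.List.sorted ((pvS pcs).map (fun pc => PySem.Int.mod (pc + (n : Int)) 12)) (fun x => x) false = pvS pcs)
      ↔ (∀ i, i < 12 → (((((i + 12 - n) % 12 : Nat)) : Int) ∈ pvS pcs ↔ (i : Int) ∈ pvS pcs)) := by
  constructor
  · intro he i hi
    rw [← pvMemMap pcs n i hn hi]
    constructor
    · intro h
      have : (i:Int) ∈ PySem.List.sorted ((pvS pcs).map (fun pc => PySem.Int.mod (pc + (n : Int)) 12)) (fun x => x) false := by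
        rw [PySem.List.mem_sorted]; exact h
      rwa [he] at this
    · intro h
      have : (i:Int) ∈ PySem.List.sorted ((pvS pcs).map (fun pc => PySem.Int.mod (pc + (n : Int)) 12)) (fun x => x) false := by
        rw [he]; exact h
      rwa [PySem.List.mem_sorted] at this
  · intro hb
    apply PySem.List.sorted_eq_of_perm_of_pairwise_lt _ _ _ _ (pvS_pairwise pcs)
    rw [List.perm_ext_iff_of_nodup ((pvS_pairwise pcs).imp (fun h => ne_of_lt h)) (pvMapNodup pcs n)]
    intro x
    by_cases hx : 0 ≤ x ∧ x < 12
    · have hxi : x = ((x.toNat : Nat) : Int) := by omega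
      rw [hxi, pvMemMap pcs n x.toNat hn (by omega)]
      exact (hb x.toNat (by omega)).symm
    · constructor
      · intro h; exact absurd (pvS_bounds pcs x h) hx
      · intro h; exact absurd (pvMapBounds pcs n x h) hx

theorem pvCond_eq (pcs : List Int) (n : Nat) (hn : n < 12) :
    decide (PySem.List.sorted ((pvS pcs).map (fun pc => PySem.Int.mod (pc + (n : Int)) 12)) (fun x => x) false = pvS pcs)
      = pvRot (pvMask pcs) n := by
  rw [Bool.eq_iff_iff, decide_eq_true_iff, pvCondA_iff pcs n hn,
      pvCondB_iff (pvMask pcs) n (pvMask_high pcs) hn]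
  constructor
  · intro h i hi
    rw [Bool.eq_iff_iff, pvMask_bit_iff_mem pcs _ (by omega), pvMask_bit_iff_mem pcs i hi]
    exact h i hi
  · intro h i hi
    rw [← pvMask_bit_iff_mem pcs _ (by omega), ← pvMask_bit_iff_mem pcs i hi, ← Bool.eq_iff_iff]
    exact h i hi

theorem pvA_mask (pcs : List Int) : invariant_under_Tn pcs = pvMaskInv (pvMask pcs) := by
  rw [show invariant_under_Tn pcs
        = (PySem.List.pyRange 0 12 1).foldl (fun invariants n =>
            if PySem.List.sorted ((pvS pcs).map (fun pc => PySem.Int.mod (pc + n) 12)) (fun x => x) false = pvS pcs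
            then invariants ++ [n] else invariants) [] from rfl]
  rw [PySem.List.foldl_append_ite_eq_filter
      (p := fun n => PySem.List.sorted ((pvS pcs).map (fun pc => PySem.Int.mod (pc + n) 12)) (fun x => x) false = pvS pcs)]
  rw [List.nil_append]
  unfold pvMaskInv
  apply List.filter_congr
  intro n hn
  have hb := PySem.List.mem_pyRange_one.mp hn
  have hnn : n = ((n.toNat : Nat) : Int) := by omega
  rw [hnn]
  exact pvCond_eq pcs n.toNat (by omega)

theorem pvB_mask (pcs : List Int) : invariant_under_Tn_alt pcs = pvMaskB (pvMask pcs) := by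
  show pvLoop (PySem.Set.ofList (pcs.map (fun pc => PySem.Int.mod pc 12))) [1, 2, 3, 4, 6, 12]
      = pvMaskB (pvMask pcs)
  simp only [pvLoop,
    pvCondC pcs 1 (by norm_num) (by norm_num),
    pvCondC pcs 2 (by norm_num) (by norm_num),
    pvCondC pcs 3 (by norm_num) (by norm_num),
    pvCondC pcs 4 (by norm_num) (by norm_num),
    pvCondC pcs 6 (by norm_num) (by norm_num),
    pvCond12 pcs]
  unfold pvMaskB
  simp only [show ((1:Int)).toNat = 1 from rfl, show ((2:Int)).toNat = 2 from rfl, show ((3:Int)).toNat = 3 from rfl,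
    show ((4:Int)).toNat = 4 from rfl, show ((6:Int)).toNat = 6 from rfl, if_true]

-- the mask-level versions of A and B agree on every 12-bit mask
set_option maxRecDepth 20000 in
theorem pvChunk : ((List.range 4096).all (fun m => pvMaskInv m == pvMaskB m)) = true := by decide

theorem pvMaskMain (m : Nat) (hm : m < 4096) : pvMaskInv m = pvMaskB m :=
  eq_of_beq (List.all_eq_true.mp pvChunk m (List.mem_range.mpr hm))

-- ===== VERDICT (by name: the statement is the Claim_ definition above) =====
theorem invariant_under_Tn_spec : Claim_equal_invariant_under_Tn := by
  intro pcs _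
  show invariant_under_Tn pcs = invariant_under_Tn_alt pcs
  rw [pvA_mask, pvB_mask]
  exact pvMaskMain (pvMask pcs) (pvMask_lt pcs)
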